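-- pv_equiv track=rewrite | github.com/mhoskin-dsc/aoc | 2019/day3.py | move_dist
-- ===== SOURCE A (Python) =====
-- direction_dictionary = {'U': (0,1),
--                         'D': (0,-1),
--                         'R': (1,0),
--                         'L': (-1,0)}
--
-- def move_dist(location, direction, distance):
--     positions = []
--
--     cardinal_motion = direction_dictionary[direction]
--     for step in range(distance):
--         location = (location[0] + cardinal_motion[0],
--                     location[1] + cardinal_motion[1])
--         positions.append(location)
--
--
--
--     return positions
-- ===== SOURCE B (Python) =====
-- direction_dictionary = {'U': (0,1),
--                         'D': (0,-1),
--                         'R': (1,0),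
--                         'L': (-1,0)}
--
-- def move_dist(location, direction, distance):
--     x0, y0 = location
--     dx, dy = direction_dictionary[direction]
--     return [(x0 + dx * i, y0 + dy * i) for i in range(1, distance + 1)]
-- ===== Notes on version B (the rewrite author's own statement) =====
-- stated objective: simpler
-- what changed: B computes each position independently in closed form (x0+dx*i, y0+dy*i) instead of accumulating the location step by step and appending; no mutable running location is kept.
-- outside the precondition, e.g. on move_dist((0, 0), 'X', 3): A raises KeyError, B raises KeyError
import Mathlib
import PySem

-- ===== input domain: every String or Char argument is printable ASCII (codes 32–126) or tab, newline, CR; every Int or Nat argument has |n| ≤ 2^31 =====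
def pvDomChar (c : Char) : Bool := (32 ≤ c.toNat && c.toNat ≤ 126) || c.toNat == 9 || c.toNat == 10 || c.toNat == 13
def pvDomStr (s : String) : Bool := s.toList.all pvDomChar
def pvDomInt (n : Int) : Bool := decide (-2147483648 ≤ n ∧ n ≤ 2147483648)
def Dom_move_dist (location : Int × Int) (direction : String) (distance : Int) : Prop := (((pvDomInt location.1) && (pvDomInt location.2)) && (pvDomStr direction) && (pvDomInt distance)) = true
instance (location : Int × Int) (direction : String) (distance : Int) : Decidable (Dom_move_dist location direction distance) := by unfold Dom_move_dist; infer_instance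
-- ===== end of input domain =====

-- B replaces A's step-by-step accumulated location with an independent closed-form
-- position (x0 + dx*i, y0 + dy*i) per step, for simplicity.

-- module-level constant used by both Pythons
def direction_dictionary : PySem.Dict String (Int × Int) :=
  PySem.Dict.ofList [("U", (0, 1)), ("D", (0, -1)), ("R", (1, 0)), ("L", (-1, 0))]

-- ===== PORT A =====
-- literal port: lookup, then a loop over range(distance) carrying (location, positions)
def move_dist (location : Int × Int) (direction : String) (distance : Int) : List (Int × Int) :=
  match PySem.Dict.get? direction_dictionary direction with
  | none => []   -- Python raises KeyError here; excluded by Pre_move_dist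
  | some cardinal_motion =>
      ((PySem.List.pyRange 0 distance 1).foldl
        (fun (st : (Int × Int) × List (Int × Int)) _ =>
          let location := (st.1.1 + cardinal_motion.1, st.1.2 + cardinal_motion.2)
          (location, st.2 ++ [location]))
        (location, [])).2

-- ===== PORT B =====
-- literal port of Source B: closed-form comprehension over range(1, distance+1)
def move_dist_alt (location : Int × Int) (direction : String) (distance : Int) : List (Int × Int) :=
  let x0 := location.1
  let y0 := location.2
  match PySem.Dict.get? direction_dictionary direction with
  | none => []   -- Python raises KeyError here; excluded by Pre_move_dist
  | some d =>
      (PySem.List.pyRange 1 (distance + 1) 1).map (fun i => (x0 + d.1 * i, y0 + d.2 * i))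

-- ===== PRECONDITION & SPEC =====
-- Pre_ excludes only directions outside the dictionary, where both Pythons raise KeyError.
def Pre_move_dist (location : Int × Int) (direction : String) (distance : Int) : Prop :=
  direction = "U" ∨ direction = "D" ∨ direction = "R" ∨ direction = "L"
instance (location : Int × Int) (direction : String) (distance : Int) : Decidable (Pre_move_dist location direction distance) := by unfold Pre_move_dist; infer_instance

def pvWitness_move_dist : (Int × Int) × String × Int := ((2, -3), "R", 4)

def Spec_move_dist (location : Int × Int) (direction : String) (distance : Int) (out : List (Int × Int)) : Prop := out = move_dist_alt location direction distance
instance (location : Int × Int) (direction : String) (distance : Int) (out : List (Int × Int)) : Decidable (Spec_move_dist location direction distance out) := by unfold Spec_move_dist; infer_instance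

-- ===== CLAIM (what is proved, stated in full; the proofs are below) =====
def Claim_equal_move_dist : Prop := ∀ (location : Int × Int) (direction : String) (distance : Int), Dom_move_dist location direction distance → Pre_move_dist location direction distance → Spec_move_dist location direction distance (move_dist location direction distance)

-- ===== LEMMAS AND PROOFS =====

-- loop invariant: after n steps the fold holds the n-th location and the map of the first n positions
theorem move_dist_loop (dx dy x0 y0 : Int) : ∀ n : Nat,
    (PySem.List.pyRange 0 (n : Int) 1).foldl
      (fun (st : (Int × Int) × List (Int × Int)) _ =>
        let l := (st.1.1 + dx, st.1.2 + dy)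
        (l, st.2 ++ [l]))
      ((x0, y0), [])
    = ((x0 + dx * n, y0 + dy * n),
       (PySem.List.pyRange 1 ((n : Int) + 1) 1).map (fun i => (x0 + dx * i, y0 + dy * i))) := by
  intro n
  induction n with
  | zero => simp [PySem.List.pyRange_one_eq_nil]
  | succ m ih =>
      have h1 : PySem.List.pyRange 0 ((m : Int) + 1) 1
          = PySem.List.pyRange 0 (m : Int) 1 ++ [(m : Int)] :=
        PySem.List.pyRange_one_succ_right (by positivity)
      have h2 : PySem.List.pyRange 1 ((m : Int) + 1 + 1) 1
          = PySem.List.pyRange 1 ((m : Int) + 1) 1 ++ [(m : Int) + 1] :=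
        PySem.List.pyRange_one_succ_right (by omega)
      push_cast
      rw [h1, List.foldl_append, ih, h2, List.map_append]
      simp
      constructor <;> ring

-- A = B for a fixed motion vector (dx, dy)
theorem move_dist_core (x0 y0 dx dy distance : Int) :
    ((PySem.List.pyRange 0 distance 1).foldl
      (fun (st : (Int × Int) × List (Int × Int)) _ =>
        let l := (st.1.1 + dx, st.1.2 + dy)
        (l, st.2 ++ [l]))
      ((x0, y0), [])).2
    = (PySem.List.pyRange 1 (distance + 1) 1).map (fun i => (x0 + dx * i, y0 + dy * i)) := by
  by_cases h : distance ≤ 0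
  · rw [PySem.List.pyRange_one_eq_nil h, PySem.List.pyRange_one_eq_nil (by omega)]
    simp
  · obtain ⟨n, rfl⟩ : ∃ n : Nat, distance = (n : Int) :=
      ⟨distance.toNat, (Int.toNat_of_nonneg (by omega)).symm⟩
    rw [move_dist_loop dx dy x0 y0 n]

-- ===== VERDICT (by name: the statement is the Claim_ definition above) =====
theorem move_dist_spec : Claim_equal_move_dist := by
  intro ⟨x0, y0⟩ direction distance _ hpre
  unfold Spec_move_dist move_dist move_dist_alt
  rcases hpre with h | h | h | h <;> subst h
  · rw [show PySem.Dict.get? direction_dictionary "U" = some (0, 1) from by decide]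
    exact move_dist_core x0 y0 _ _ distance
  · rw [show PySem.Dict.get? direction_dictionary "D" = some (0, -1) from by decide]
    exact move_dist_core x0 y0 _ _ distance
  · rw [show PySem.Dict.get? direction_dictionary "R" = some (1, 0) from by decide]
    exact move_dist_core x0 y0 _ _ distance
  · rw [show PySem.Dict.get? direction_dictionary "L" = some (-1, 0) from by decide]
    exact move_dist_core x0 y0 _ _ distance
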